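-- pv_equiv track=rewrite | github.com/ilya-kolchinsky/GMeetSummarizer | processor.py | filter_noisy_speakers
-- ===== SOURCE A (Python) =====
-- def filter_noisy_speakers(speaker_timeline):
--     filtered_speaker_timeline = []
--     for i, record in enumerate(speaker_timeline):
--         if i == 0 or i == len(speaker_timeline) - 1:
--             filtered_speaker_timeline.append(record)
--             continue
--
--         current_speaker = record[1]
--         prev_speaker = speaker_timeline[i-1][1]
--         next_speaker = speaker_timeline[i+1][1]
--         if current_speaker != prev_speaker and current_speaker != next_speaker:
--             continue
--
--         filtered_speaker_timeline.append(record)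
--
--     return filtered_speaker_timeline
-- ===== SOURCE B (Python) =====
-- def filter_noisy_speakers(speaker_timeline):
--     out = []
--     n = len(speaker_timeline)
--     i = 0
--     while i < n:
--         sp = speaker_timeline[i][1]
--         j = i + 1
--         while j < n and speaker_timeline[j][1] == sp:
--             j += 1
--         # run is speaker_timeline[i:j]; keep it if it has >= 2 records
--         # or it is the first or the last run
--         if j - i >= 2 or i == 0 or j == n:
--             out.extend(speaker_timeline[i:j])
--         i = j
--     return out
-- ===== Notes on version B (the rewrite author's own statement) =====
-- stated objective: alternative
-- what changed: A decides each record by comparing its speaker with its index-neighbours (i-1/i+1) inside one indexed loop; B instead scans the timeline once into maximal same-speaker runs and keeps a whole run iff it has >=2 records or is the first or last run.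
import Mathlib
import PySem

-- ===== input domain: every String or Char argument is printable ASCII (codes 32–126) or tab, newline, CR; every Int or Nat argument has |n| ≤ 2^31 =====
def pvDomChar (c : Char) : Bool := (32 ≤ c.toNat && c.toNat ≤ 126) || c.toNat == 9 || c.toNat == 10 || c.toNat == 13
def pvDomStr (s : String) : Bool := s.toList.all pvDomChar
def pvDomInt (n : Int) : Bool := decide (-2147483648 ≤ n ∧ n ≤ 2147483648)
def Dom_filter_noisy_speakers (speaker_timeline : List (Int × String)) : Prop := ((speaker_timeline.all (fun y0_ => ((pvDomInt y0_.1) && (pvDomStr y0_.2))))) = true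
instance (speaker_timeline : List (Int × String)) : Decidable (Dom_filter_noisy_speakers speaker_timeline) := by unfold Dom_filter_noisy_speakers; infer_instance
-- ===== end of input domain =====

-- B replaces A's per-element prev/next index comparisons by a single run-building pass
-- (maximal same-speaker runs; keep a run iff it has ≥2 records or is the first/last run): alternative decomposition, same O(n) cost.


-- ===== PORT A =====
-- for i, record in enumerate(...): keep i==0 / i==n-1; else compare with tl[i-1], tl[i+1].
-- tl[i-1]/tl[i+1] are always in range in the branch where Python evaluates them, so the
-- pyGetD default (the record itself) is never used.
def filter_noisy_speakers (speaker_timeline : List (Int × String)) : List (Int × String) :=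
  (PySem.List.enumerate speaker_timeline 0).foldl
    (fun acc p =>
      if p.1 = 0 ∨ p.1 = (speaker_timeline.length : Int) - 1 then acc ++ [p.2]
      else
        let current_speaker := p.2.2
        let prev_speaker := (PySem.List.pyGetD speaker_timeline (p.1 - 1) p.2).2
        let next_speaker := (PySem.List.pyGetD speaker_timeline (p.1 + 1) p.2).2
        if current_speaker ≠ prev_speaker ∧ current_speaker ≠ next_speaker then acc
        else acc ++ [p.2]) []

-- ===== PORT B =====
-- inner while loop of Source B: advance j while speaker_timeline[j][1] == sp
def altRunEnd (tl : List (Int × String)) (sp : String) (j : Nat) : Nat :=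
  if h : j < tl.length then
    if (tl[j]'h).2 = sp then altRunEnd tl sp (j + 1) else j
  else j
termination_by tl.length - j
decreasing_by omega

theorem altRunEnd_ge (tl : List (Int × String)) (sp : String) (j : Nat) :
    j ≤ altRunEnd tl sp j := by
  fun_induction altRunEnd tl sp j with
  | case1 j h h2 ih => omega
  | case2 j h h2 => omega
  | case3 j h => omega

-- outer while loop of Source B: state (i, out)
def altGo (tl : List (Int × String)) (i : Nat) (out : List (Int × String)) : List (Int × String) :=
  if h : i < tl.length then
    let sp := (tl[i]'h).2
    let j := altRunEnd tl sp (i + 1)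
    let out' := if 2 ≤ j - i ∨ i = 0 ∨ j = tl.length
                then out ++ PySem.List.slice tl (some (i : Int)) (some (j : Int)) else out
    altGo tl j out'
  else out
termination_by tl.length - i
decreasing_by have := altRunEnd_ge tl (tl[i]'h).2 (i + 1); omega

def filter_noisy_speakers_alt (speaker_timeline : List (Int × String)) : List (Int × String) :=
  altGo speaker_timeline 0 []

-- ===== PRECONDITION & SPEC =====
def Spec_filter_noisy_speakers (speaker_timeline : List (Int × String)) (out : List (Int × String)) : Prop := out = filter_noisy_speakers_alt speaker_timeline
instance (speaker_timeline : List (Int × String)) (out : List (Int × String)) : Decidable (Spec_filter_noisy_speakers speaker_timeline out) := by unfold Spec_filter_noisy_speakers; infer_instance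

-- ===== CLAIM (what is proved, stated in full; the proofs are below) =====
def Claim_equal_filter_noisy_speakers : Prop := ∀ (speaker_timeline : List (Int × String)), Dom_filter_noisy_speakers speaker_timeline → Spec_filter_noisy_speakers speaker_timeline (filter_noisy_speakers speaker_timeline)

-- ===== LEMMAS AND PROOFS =====

-- the element contributed by A's loop body for entry (i, record)
def fA (tl : List (Int × String)) : Int × (Int × String) → List (Int × String)
  | (i, r) =>
    if i = 0 ∨ i = (tl.length : Int) - 1 then [r]
    else if r.2 ≠ (PySem.List.pyGetD tl (i - 1) r).2 ∧
            r.2 ≠ (PySem.List.pyGetD tl (i + 1) r).2 then []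
    else [r]

-- reference recursion: head kept; interior element kept iff it matches its predecessor
-- or successor; last kept
def refGo (p : Int × String) : List (Int × String) → List (Int × String)
  | [] => []
  | [y] => [y]
  | y :: z :: t => (if y.2 = p.2 ∨ y.2 = z.2 then [y] else []) ++ refGo y (z :: t)

def refAll : List (Int × String) → List (Int × String)
  | [] => []
  | x :: rest => x :: refGo x rest

-- run view of B: maximal same-speaker runs; keep a run iff length ≥ 2, first, or last
def bruns : List (Int × String) → Bool → List (Int × String)
  | [], _ => []
  | y :: t, isFirst =>
      (if 2 ≤ (y :: t.takeWhile (fun a => a.2 == y.2)).length ∨ isFirst = true ∨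
          t.dropWhile (fun a => a.2 == y.2) = []
       then y :: t.takeWhile (fun a => a.2 == y.2) else []) ++
      bruns (t.dropWhile (fun a => a.2 == y.2)) false
termination_by l _ => l.length
decreasing_by simp [List.length_dropWhile_le]

theorem A_eq_flatMap (tl : List (Int × String)) :
    filter_noisy_speakers tl = (PySem.List.enumerate tl 0).flatMap (fA tl) := by
  unfold filter_noisy_speakers
  have h : (fun (acc : List (Int × String)) (p : Int × (Int × String)) =>
      if p.1 = 0 ∨ p.1 = (tl.length : Int) - 1 then acc ++ [p.2]
      else
        let current_speaker := p.2.2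
        let prev_speaker := (PySem.List.pyGetD tl (p.1 - 1) p.2).2
        let next_speaker := (PySem.List.pyGetD tl (p.1 + 1) p.2).2
        if current_speaker ≠ prev_speaker ∧ current_speaker ≠ next_speaker then acc
        else acc ++ [p.2]) = (fun acc p => acc ++ fA tl p) := by
    funext acc p
    obtain ⟨i, r⟩ := p
    dsimp only
    simp only [fA]
    split_ifs <;> simp
  rw [h, PySem.List.foldl_append_eq_flatMap]
  simp

theorem flat_suffix (l : List (Int × String)) :
    ∀ (pre : List (Int × String)) (x : Int × String),
    (PySem.List.enumerate l ((pre.length : Int) + 1)).flatMap (fA (pre ++ x :: l))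
      = refGo x l := by
  induction l with
  | nil => intro pre x; simp [PySem.List.enumerate, refGo]
  | cons y t ih =>
    intro pre x
    cases t with
    | nil =>
      rw [PySem.List.enumerate_cons]
      simp only [PySem.List.enumerate_nil, List.flatMap_cons, List.flatMap_nil, List.append_nil]
      simp only [fA]
      split_ifs with h1 h2 <;>
        first
          | rfl
          | (exfalso; simp only [not_or, List.length_append, List.length_cons,
              List.length_nil] at h1; push_cast at h1; omega)
    | cons z t' =>
      rw [PySem.List.enumerate_cons, List.flatMap_cons]
      have tl_eq : (pre ++ [x]) ++ y :: z :: t' = pre ++ x :: y :: z :: t' := by simp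
      have ihy := ih (pre ++ [x]) y
      rw [tl_eq] at ihy
      have hslen : (((pre ++ [x]).length : Int) + 1) = ((pre.length : Int) + 1) + 1 := by
        simp
      rw [hslen] at ihy
      rw [ihy]
      have hgoal : refGo x (y :: z :: t')
          = (if y.2 = x.2 ∨ y.2 = z.2 then [y] else []) ++ refGo y (z :: t') := rfl
      rw [hgoal]
      congr 1
      have h0 : ¬ (((pre.length : Int) + 1) = 0 ∨
          ((pre.length : Int) + 1) = (((pre ++ x :: y :: z :: t').length : Int) - 1)) := by
        simp only [not_or, List.length_append, List.length_cons]
        push_cast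
        omega
      have hprev : PySem.List.pyGetD (pre ++ x :: y :: z :: t') ((pre.length : Int) + 1 - 1) y
          = x := by
        have hidx : ((pre.length : Int) + 1 - 1) = ((pre.length : Nat) : Int) := by omega
        rw [hidx, PySem.List.pyGetD_natCast]
        simp [List.getD]
      have hnext : PySem.List.pyGetD (pre ++ x :: y :: z :: t') ((pre.length : Int) + 1 + 1) y
          = z := by
        have hidx : ((pre.length : Int) + 1 + 1) = (((pre.length + 2 : Nat)) : Int) := by
          omega
        rw [hidx, PySem.List.pyGetD_natCast]
        simp [List.getD]
      simp only [fA]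
      rw [if_neg h0, hprev, hnext]
      by_cases hc : y.2 = x.2 ∨ y.2 = z.2
      · rw [if_pos hc, if_neg (by tauto)]
      · rw [if_neg hc, if_pos (by tauto)]

theorem A_eq_refAll (tl : List (Int × String)) : filter_noisy_speakers tl = refAll tl := by
  rw [A_eq_flatMap]
  cases tl with
  | nil => simp [PySem.List.enumerate, refAll]
  | cons x rest =>
    rw [PySem.List.enumerate_cons, List.flatMap_cons]
    have h := flat_suffix rest [] x
    simp only [List.length_nil, Nat.cast_zero, List.nil_append] at h
    rw [h]
    simp [fA, refAll]

theorem altRunEnd_eq (tl : List (Int × String)) (sp : String) (j : Nat) :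
    altRunEnd tl sp j = j + ((tl.drop j).takeWhile (fun a => a.2 == sp)).length := by
  fun_induction altRunEnd tl sp j with
  | case1 j h h2 ih =>
    rw [ih]
    have hd : tl.drop j = tl[j] :: tl.drop (j + 1) := (List.getElem_cons_drop h).symm
    rw [hd, List.takeWhile_cons]
    simp [h2]
    omega
  | case2 j h h2 =>
    have hd : tl.drop j = tl[j] :: tl.drop (j + 1) := (List.getElem_cons_drop h).symm
    rw [hd, List.takeWhile_cons]
    simp [h2]
  | case3 j h =>
    rw [List.drop_eq_nil_of_le (by omega)]
    simp

theorem altGo_eq (tl : List (Int × String)) (i : Nat) (out : List (Int × String)) :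
    altGo tl i out = out ++ bruns (tl.drop i) (decide (i = 0)) := by
  fun_induction altGo tl i out with
  | case2 i out h =>
    rw [List.drop_eq_nil_of_le (by omega), bruns]
    simp
  | case1 i out h sp j out' ih =>
    rw [ih]
    have hdrop : List.drop i tl = (tl[i]'h) :: List.drop (i + 1) tl :=
      (List.getElem_cons_drop h).symm
    have hj : j = i + 1 + ((List.drop (i + 1) tl).takeWhile (fun a => a.2 == (tl[i]'h).2)).length :=
      altRunEnd_eq tl ((tl[i]'h).2) (i + 1)
    have htwle : ((List.drop (i + 1) tl).takeWhile (fun a => a.2 == (tl[i]'h).2)).length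
        ≤ tl.length - (i + 1) := by
      have h1 := (List.takeWhile_prefix (l := List.drop (i + 1) tl)
        (fun a => a.2 == (tl[i]'h).2)).length_le
      simpa using h1
    have htake : (List.drop (i + 1) tl).take
          ((List.drop (i + 1) tl).takeWhile (fun a => a.2 == (tl[i]'h).2)).length
        = (List.drop (i + 1) tl).takeWhile (fun a => a.2 == (tl[i]'h).2) :=
      (List.prefix_iff_eq_take.mp (List.takeWhile_prefix _)).symm
    have hslice : PySem.List.slice tl (some (i : Int)) (some (j : Int))
        = (tl[i]'h) :: (List.drop (i + 1) tl).takeWhile (fun a => a.2 == (tl[i]'h).2) := by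
      rw [PySem.List.slice_natCast, hdrop]
      have hji : j - i
          = ((List.drop (i + 1) tl).takeWhile (fun a => a.2 == (tl[i]'h).2)).length + 1 := by
        omega
      rw [hji, List.take_succ_cons, htake]
    have hdw : (List.drop (i + 1) tl).dropWhile (fun a => a.2 == (tl[i]'h).2)
        = (List.drop (i + 1) tl).drop
            ((List.drop (i + 1) tl).takeWhile (fun a => a.2 == (tl[i]'h).2)).length := by
      have e1 := List.takeWhile_append_dropWhile
        (p := fun a => a.2 == (tl[i]'h).2) (l := List.drop (i + 1) tl)
      have e2 := List.take_append_drop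
        ((List.drop (i + 1) tl).takeWhile (fun a => a.2 == (tl[i]'h).2)).length
        (List.drop (i + 1) tl)
      rw [htake] at e2
      exact List.append_cancel_left (e1.trans e2.symm)
    have hrest : List.drop j tl
        = (List.drop (i + 1) tl).dropWhile (fun a => a.2 == (tl[i]'h).2) := by
      have hj2 : j = ((List.drop (i + 1) tl).takeWhile
          (fun a => a.2 == (tl[i]'h).2)).length + (i + 1) := by omega
      rw [hj2, hdw, List.drop_drop]
      congr 1
      omega
    have hjiff : j = tl.length ↔
        (List.drop (i + 1) tl).dropWhile (fun a => a.2 == (tl[i]'h).2) = [] := by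
      rw [← hrest, List.drop_eq_nil_iff]
      omega
    have hout : out' = out ++ (if 2 ≤ j - i ∨ i = 0 ∨ j = tl.length
        then PySem.List.slice tl (some (i : Int)) (some (j : Int)) else []) := by
      show (if 2 ≤ j - i ∨ i = 0 ∨ j = tl.length
          then out ++ PySem.List.slice tl (some (i : Int)) (some (j : Int)) else out) = _
      split_ifs <;> simp
    rw [hout, List.append_assoc]
    congr 1
    rw [hdrop, bruns]
    have hjne : decide (j = 0) = false := by
      have : j ≠ 0 := by omega
      simp [this]
    rw [hrest, hjne]
    congr 1
    have hC : (2 ≤ j - i ∨ i = 0 ∨ j = tl.length) ↔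
        (2 ≤ ((tl[i]'h) ::
            (List.drop (i + 1) tl).takeWhile (fun a => a.2 == (tl[i]'h).2)).length ∨
         decide (i = 0) = true ∨
         (List.drop (i + 1) tl).dropWhile (fun a => a.2 == (tl[i]'h).2) = []) := by
      rw [List.length_cons, decide_eq_true_eq, ← hjiff]
      constructor
      · rintro (h1 | h1 | h1)
        · left; omega
        · right; left; exact h1
        · right; right; exact h1
      · rintro (h1 | h1 | h1)
        · left; omega
        · right; left; exact h1
        · right; right; exact h1
    rw [if_congr hC hslice rfl]

theorem B_eq_bruns (tl : List (Int × String)) :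
    filter_noisy_speakers_alt tl = bruns tl true := by
  unfold filter_noisy_speakers_alt
  rw [altGo_eq]
  simp

theorem refGo_final (run : List (Int × String)) :
    ∀ (y p : Int × String), (∀ a ∈ run, a.2 = y.2) → refGo p (y :: run) = y :: run := by
  induction run with
  | nil => intro y p _; rfl
  | cons w run' ih =>
    intro y p h
    have hw : w.2 = y.2 := h w (by simp)
    simp only [refGo, if_pos (Or.inr hw.symm)]
    rw [ih w y (fun a ha => (h a (by simp [ha])).trans hw.symm)]
    simp

theorem refGo_inrun (run : List (Int × String)) :
    ∀ (y p z : Int × String) (rest' : List (Int × String)),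
    p.2 = y.2 → (∀ a ∈ run, a.2 = y.2) → z.2 ≠ y.2 →
    refGo p (y :: run ++ z :: rest')
      = (y :: run) ++ refGo ((y :: run).getLast (by simp)) (z :: rest') := by
  induction run with
  | nil =>
    intro y p z rest' hp _ _
    simp only [List.cons_append, List.nil_append]
    rw [show refGo p (y :: z :: rest')
        = (if y.2 = p.2 ∨ y.2 = z.2 then [y] else []) ++ refGo y (z :: rest') from rfl]
    rw [if_pos (Or.inl hp.symm)]
    simp [List.getLast]
  | cons w run' ih =>
    intro y p z rest' hp h hz
    have hw : w.2 = y.2 := h w (by simp)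
    have ihw := ih w y z rest' hw.symm
      (fun a ha => (h a (by simp [ha])).trans hw.symm)
      (fun hc => hz (hc.trans hw))
    simp only [List.cons_append] at ihw ⊢
    rw [show refGo p (y :: w :: (run' ++ z :: rest'))
        = (if y.2 = p.2 ∨ y.2 = w.2 then [y] else []) ++ refGo y (w :: (run' ++ z :: rest'))
        from rfl]
    rw [if_pos (Or.inl hp.symm), ihw]
    simp [List.getLast_cons]

theorem refGo_boundary (run : List (Int × String)) (y p z : Int × String)
    (rest' : List (Int × String))
    (hp : p.2 ≠ y.2) (h : ∀ a ∈ run, a.2 = y.2) (hz : z.2 ≠ y.2) :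
    refGo p (y :: run ++ z :: rest')
      = (if run = [] then [] else y :: run) ++
        refGo ((y :: run).getLast (by simp)) (z :: rest') := by
  cases run with
  | nil =>
    have h1 : ¬ (y.2 = p.2 ∨ y.2 = z.2) := by
      rintro (hc | hc)
      · exact hp hc.symm
      · exact hz hc.symm
    simp only [List.cons_append, List.nil_append]
    rw [show refGo p (y :: z :: rest')
        = (if y.2 = p.2 ∨ y.2 = z.2 then [y] else []) ++ refGo y (z :: rest') from rfl]
    rw [if_neg h1]
    simp [List.getLast]
  | cons w run' =>
    have hw : w.2 = y.2 := h w (by simp)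
    have hin := refGo_inrun run' w y z rest' hw.symm
      (fun a ha => (h a (by simp [ha])).trans hw.symm)
      (fun hc => hz (hc.trans hw))
    simp only [List.cons_append] at hin ⊢
    rw [show refGo p (y :: w :: (run' ++ z :: rest'))
        = (if y.2 = p.2 ∨ y.2 = w.2 then [y] else []) ++ refGo y (w :: (run' ++ z :: rest'))
        from rfl]
    rw [if_pos (Or.inr hw.symm), hin]
    simp [List.getLast_cons]


theorem bruns_refGo : ∀ (n : Nat) (l : List (Int × String)) (p : Int × String),
    l.length ≤ n → (∀ z rest', l = z :: rest' → p.2 ≠ z.2) →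
    bruns l false = refGo p l := by
  intro n
  induction n with
  | zero =>
    intro l p hl _
    have h0 : l = [] := List.eq_nil_of_length_eq_zero (by omega)
    subst h0
    rw [bruns]
    rfl
  | succ n ih =>
    intro l p hl hp
    cases l with
    | nil => rw [bruns]; rfl
    | cons y t =>
      have hpy : p.2 ≠ y.2 := hp y t rfl
      have hall : ∀ a ∈ t.takeWhile (fun a => a.2 == y.2), a.2 = y.2 := by
        intro a ha
        have := List.mem_takeWhile_imp ha
        simpa using this
      have ht : t.takeWhile (fun a => a.2 == y.2) ++ t.dropWhile (fun a => a.2 == y.2) = t :=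
        List.takeWhile_append_dropWhile
      rw [bruns]
      cases hrest : t.dropWhile (fun a => a.2 == y.2) with
      | nil =>
        have ht2 : t.takeWhile (fun a => a.2 == y.2) = t := by
          rw [hrest] at ht; simpa using ht
        rw [if_pos (Or.inr (Or.inr rfl)), bruns, List.append_nil, ht2,
          refGo_final t y p (by rw [← ht2]; exact hall)]
      | cons z rest' =>
        have hne : t.dropWhile (fun a => a.2 == y.2) ≠ [] := by rw [hrest]; simp
        have hz : z.2 ≠ y.2 := by
          have hh := List.head_dropWhile_not (l := t) (fun a => a.2 == y.2) hne
          simp only [hrest, List.head_cons] at hh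
          simpa using hh
        have hre : refGo p (y :: t)
            = (if t.takeWhile (fun a => a.2 == y.2) = [] then []
               else y :: t.takeWhile (fun a => a.2 == y.2)) ++
              refGo ((y :: t.takeWhile (fun a => a.2 == y.2)).getLast (by simp))
                (z :: rest') := by
          conv_lhs => rw [show (y :: t) = y :: t.takeWhile (fun a => a.2 == y.2) ++ z :: rest' by
            rw [List.cons_append, ← hrest, ht]]
          exact refGo_boundary _ y p z rest' hpy hall hz
        rw [hre]
        have hlast : ((y :: t.takeWhile (fun a => a.2 == y.2)).getLast (by simp)).2 = y.2 := by
          have hmem := List.getLast_mem (l := y :: t.takeWhile (fun a => a.2 == y.2)) (by simp)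
          rcases List.mem_cons.mp hmem with h1 | h1
          · rw [h1]
          · exact hall _ h1
        have hb : bruns (z :: rest') false
            = refGo ((y :: t.takeWhile (fun a => a.2 == y.2)).getLast (by simp)) (z :: rest') := by
          apply ih
          · have h1 : (t.dropWhile (fun a => a.2 == y.2)).length ≤ t.length :=
              List.length_dropWhile_le _ _
            rw [hrest] at h1
            simp only [List.length_cons] at hl h1 ⊢
            omega
          · rintro z' rest'' hzz
            injection hzz with hz1 _
            rw [← hz1, hlast]
            exact fun hc => hz hc.symm
        rw [hb]
        congr 1
        cases htw : t.takeWhile (fun a => a.2 == y.2) with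
        | nil => simp
        | cons w run' => simp


theorem bruns_true_eq_refAll (tl : List (Int × String)) : bruns tl true = refAll tl := by
  cases tl with
  | nil => rw [bruns]; rfl
  | cons y t =>
    rw [bruns, if_pos (Or.inr (Or.inl rfl)),
      show refAll (y :: t) = y :: refGo y t from rfl]
    have hall : ∀ a ∈ t.takeWhile (fun a => a.2 == y.2), a.2 = y.2 := by
      intro a ha
      have := List.mem_takeWhile_imp ha
      simpa using this
    have ht : t.takeWhile (fun a => a.2 == y.2) ++ t.dropWhile (fun a => a.2 == y.2) = t :=
      List.takeWhile_append_dropWhile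
    cases hrest : t.dropWhile (fun a => a.2 == y.2) with
    | nil =>
      have ht2 : t.takeWhile (fun a => a.2 == y.2) = t := by
        rw [hrest] at ht; simpa using ht
      rw [bruns, List.append_nil, ht2]
      cases t with
      | nil => rfl
      | cons w t' =>
        have hw : w.2 = y.2 := by
          have := hall w (by rw [ht2]; simp)
          exact this
        rw [refGo_final t' w y (by
          intro a ha
          have h1 := hall a (by rw [ht2]; simp [ha])
          rw [h1, hw])]
    | cons z rest' =>
      have hne : t.dropWhile (fun a => a.2 == y.2) ≠ [] := by rw [hrest]; simp
      have hz : z.2 ≠ y.2 := by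
        have hh := List.head_dropWhile_not (l := t) (fun a => a.2 == y.2) hne
        simp only [hrest, List.head_cons] at hh
        simpa using hh
      have htt : t = t.takeWhile (fun a => a.2 == y.2) ++ z :: rest' := by
        rw [← hrest, ht]
      cases htw : t.takeWhile (fun a => a.2 == y.2) with
      | nil =>
        have ht3 : t = z :: rest' := by rw [htt, htw]; rfl
        rw [ht3]
        rw [bruns_refGo (z :: rest').length (z :: rest') y (le_refl _)
          (by rintro z' rest'' hzz; injection hzz with h1 _; rw [← h1]; exact fun hc => hz hc.symm)]
        rfl
      | cons w run' =>
        have hw : w.2 = y.2 := by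
          have := hall w (by rw [htw]; simp)
          exact this
        have hall' : ∀ a ∈ run', a.2 = w.2 := by
          intro a ha
          have h1 := hall a (by rw [htw]; simp [ha])
          rw [h1, hw]
        have hin := refGo_inrun run' w y z rest' hw.symm hall'
          (fun hc => hz (hc.trans hw))
        have hlast : ((w :: run').getLast (by simp)).2 = y.2 := by
          have hmem := List.getLast_mem (l := w :: run') (by simp)
          rcases List.mem_cons.mp hmem with h1 | h1
          · rw [h1]; exact hw
          · rw [hall' _ h1, hw]
        have hb : bruns (z :: rest') false
            = refGo ((w :: run').getLast (by simp)) (z :: rest') := by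
          apply bruns_refGo (z :: rest').length _ _ (le_refl _)
          rintro z' rest'' hzz
          injection hzz with h1 _
          rw [← h1, hlast]
          exact fun hc => hz hc.symm
        rw [hb]
        conv_rhs => rw [htt, htw]
        rw [hin]
        simp

-- ===== VERDICT (by name: the statement is the Claim_ definition above) =====
theorem filter_noisy_speakers_spec : Claim_equal_filter_noisy_speakers := by
  intro tl _
  show filter_noisy_speakers tl = filter_noisy_speakers_alt tl
  rw [A_eq_refAll, B_eq_bruns, bruns_true_eq_refAll]
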